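-- pv_equiv track=rewrite | github.com/CihangPeng/ROVI | resampling/merge_logic.py | merge_and_update_labels
-- ===== SOURCE A (Python) =====
-- def merge_and_update_labels(ov_lists, label_lists):
--     """Merge object vocabulary lists and update corresponding labels.
--
--     Args:
--         ov_lists: List of object vocabulary lists
--         label_lists: List of label arrays corresponding to each vocabulary
--
--     Returns:
--         tuple: (merged_ov_list, rearranged_labels)
--     """
--     merged_set = set()
--     for lst in ov_lists:
--         merged_set.update(lst)
--
--     merged_list = list(merged_set)
--     merged_list.sort()
--
--     string_to_new_index = {string: index for index, string in enumerate(merged_list)}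
--
--     rearranged_labels = []
--     for i, labels in enumerate(label_lists):
--         new_labels = [string_to_new_index[ov_lists[i][idx]] for idx in labels]
--         rearranged_labels.append(new_labels)
--
--     return merged_list, rearranged_labels
-- ===== SOURCE B (Python) =====
-- def merge_and_update_labels(ov_lists, label_lists):
--     """Merge object vocabulary lists and update corresponding labels.
--
--     Sort-based ranking instead of hash set + dict: collect every occurrence
--     (string, list_id, pos), sort the occurrences by string once, then in a
--     single scan build the deduplicated merged list and fill integer remap
--     tables remaps[list_id][pos] = new index.  Labels are then remapped by
--     plain integer table indexing; no set and no string-keyed lookup exist.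
--     (Order among equal strings is irrelevant: equal strings get equal ranks.)
--     """
--     occ = [(s, i, p) for i, lst in enumerate(ov_lists) for p, s in enumerate(lst)]
--     occ.sort(key=lambda t: t[0])
--
--     merged_list = []
--     remaps = [[0] * len(lst) for lst in ov_lists]
--     for s, i, p in occ:
--         if not merged_list or merged_list[-1] != s:
--             merged_list.append(s)
--         remaps[i][p] = len(merged_list) - 1
--
--     rearranged_labels = [[remaps[i][idx] for idx in labels]
--                          for i, labels in enumerate(label_lists)]
--     return merged_list, rearranged_labels
-- ===== Notes on version B (the rewrite author's own statement) =====
-- stated objective: alternative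
-- what changed: Replaces A's hash set + string-to-index dict with sort-based ranking: every occurrence (string, list_id, pos) is sorted by string once, and a single scan simultaneously builds the deduplicated merged list and fills integer remap tables remaps[list_id][pos]; labels are then remapped by plain integer table indexing, so no set and no string-keyed lookup structure exist at all.
import Mathlib
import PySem

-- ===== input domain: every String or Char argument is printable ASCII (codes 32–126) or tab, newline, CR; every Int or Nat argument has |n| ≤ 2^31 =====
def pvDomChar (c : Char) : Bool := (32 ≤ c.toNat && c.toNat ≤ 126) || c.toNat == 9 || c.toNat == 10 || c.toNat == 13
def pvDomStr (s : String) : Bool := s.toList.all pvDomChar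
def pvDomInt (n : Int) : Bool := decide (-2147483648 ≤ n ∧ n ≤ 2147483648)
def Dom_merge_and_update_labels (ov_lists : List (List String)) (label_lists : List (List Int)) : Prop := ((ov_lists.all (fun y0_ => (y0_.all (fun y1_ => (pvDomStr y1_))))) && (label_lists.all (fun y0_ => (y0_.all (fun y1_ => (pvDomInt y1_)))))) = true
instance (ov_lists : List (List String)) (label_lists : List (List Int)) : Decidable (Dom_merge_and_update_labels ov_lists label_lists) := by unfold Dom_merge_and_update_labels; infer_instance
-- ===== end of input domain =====

-- B replaces A's hash set + string->index dict by sort-based ranking: all (string, list, pos)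
-- occurrences are sorted once and one scan builds the merged list and integer remap tables;
-- labels are remapped by integer table indexing (objective: alternative).


-- ===== PORT A =====
def merge_and_update_labels (ov_lists : List (List String)) (label_lists : List (List Int)) : List String × List (List Int) :=
  -- merged_set = set(); for lst in ov_lists: merged_set.update(lst)
  let merged_set : PySem.Set String := ov_lists.foldl (fun s lst => PySem.Set.update s lst) PySem.Set.empty
  -- merged_list = list(merged_set); merged_list.sort()   (the sort makes the set's order irrelevant)
  let merged_list : List String := PySem.List.sorted merged_set (fun x => x)
  -- string_to_new_index = {string: index for index, string in enumerate(merged_list)}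
  let string_to_new_index : PySem.Dict String Int :=
    (PySem.List.enumerate merged_list).foldl (fun d p => d.insert p.2 p.1) PySem.Dict.empty
  -- for i, labels in enumerate(label_lists): append [string_to_new_index[ov_lists[i][idx]] for idx in labels]
  -- (pyGetD/getD totalize the IndexError cases; Pre_ excludes exactly those inputs, and the dict
  -- lookup never misses because ov_lists[i][idx] was merged into the set)
  let rearranged_labels : List (List Int) :=
    (PySem.List.enumerate label_lists).foldl
      (fun acc p =>
        acc ++ [p.2.map (fun idx =>
          string_to_new_index.getD (PySem.List.pyGetD (PySem.List.pyGetD ov_lists p.1 []) idx "") 0)]) []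
  (merged_list, rearranged_labels)

-- ===== PORT B =====
-- one step of B's scan over the sorted occurrences: 'if not merged_list or merged_list[-1] != s:
-- merged_list.append(s)' then 'remaps[i][p] = len(merged_list) - 1'
def bScanStep (st : List String × List (List Int)) (t : String × Int × Int) : List String × List (List Int) :=
  let ml := if st.1 = [] ∨ st.1.getLast? ≠ some t.1 then st.1 ++ [t.1] else st.1
  (ml, PySem.List.pySetD st.2 t.2.1
         (PySem.List.pySetD (PySem.List.pyGetD st.2 t.2.1 []) t.2.2 ((ml.length : Int) - 1)))

def merge_and_update_labels_alt (ov_lists : List (List String)) (label_lists : List (List Int)) : List String × List (List Int) :=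
  -- occ = [(s, i, p) for i, lst in enumerate(ov_lists) for p, s in enumerate(lst)]
  let occ0 : List (String × Int × Int) :=
    (PySem.List.enumerate ov_lists).flatMap (fun q =>
      (PySem.List.enumerate q.2).map (fun r => (r.2, q.1, r.1)))
  -- occ.sort(key=lambda t: t[0])
  let occ := PySem.List.sorted occ0 (fun t => t.1)
  -- remaps = [[0] * len(lst) for lst in ov_lists]
  let remaps0 : List (List Int) := ov_lists.map (fun lst => List.replicate lst.length 0)
  -- merged_list = []; for s, i, p in occ: …   (bScanStep)
  let st := occ.foldl bScanStep ([], remaps0)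
  -- [[remaps[i][idx] for idx in labels] for i, labels in enumerate(label_lists)]
  let rearranged := (PySem.List.enumerate label_lists).map (fun p =>
    p.2.map (fun idx => PySem.List.pyGetD (PySem.List.pyGetD st.2 p.1 []) idx 0))
  (st.1, rearranged)

-- ===== PRECONDITION & SPEC =====
-- Pre_ excludes exactly the inputs where the Python A raises IndexError: a NONEMPTY label
-- list at position i with no vocabulary list ov_lists[i], or a label idx outside Python's
-- index range -len(ov_lists[i]) .. len(ov_lists[i])-1 for the matching vocabulary
-- (an empty label list never indexes, so it is unconstrained).
def Pre_merge_and_update_labels (ov_lists : List (List String)) (label_lists : List (List Int)) : Prop :=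
  ∀ p ∈ PySem.List.enumerate label_lists, p.2 ≠ [] →
    p.1 < (ov_lists.length : Int) ∧
    ∀ idx ∈ p.2, PySem.Raise.InRange (PySem.List.pyGetD ov_lists p.1 []).length idx
instance (ov_lists : List (List String)) (label_lists : List (List Int)) : Decidable (Pre_merge_and_update_labels ov_lists label_lists) := by unfold Pre_merge_and_update_labels; infer_instance

def pvWitness_merge_and_update_labels : List (List String) × List (List Int) :=
  ([["b", "a"], ["c", "a"]], [[0, 1, -1], [1]])

def Spec_merge_and_update_labels (ov_lists : List (List String)) (label_lists : List (List Int)) (out : List String × List (List Int)) : Prop := out = merge_and_update_labels_alt ov_lists label_lists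
instance (ov_lists : List (List String)) (label_lists : List (List Int)) (out : List String × List (List Int)) : Decidable (Spec_merge_and_update_labels ov_lists label_lists out) := by unfold Spec_merge_and_update_labels; infer_instance

-- ===== CLAIM (what is proved, stated in full; the proofs are below) =====
def Claim_equal_merge_and_update_labels : Prop := ∀ (ov_lists : List (List String)) (label_lists : List (List Int)), Dom_merge_and_update_labels ov_lists label_lists → Pre_merge_and_update_labels ov_lists label_lists → Spec_merge_and_update_labels ov_lists label_lists (merge_and_update_labels ov_lists label_lists)

-- ===== LEMMAS AND PROOFS =====

-- The set-union fold keeps the Set invariant: no duplicates.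
theorem nodup_foldl_update (ov_lists : List (List String)) (s : PySem.Set String) (hs : s.Nodup) :
    (ov_lists.foldl (fun s lst => PySem.Set.update s lst) s).Nodup := by
  induction ov_lists generalizing s with
  | nil => exact hs
  | cons a t ih => exact ih _ (PySem.Set.nodup_update s a hs)

-- Membership in the set-union fold: exactly the elements of some input list.
theorem mem_foldl_update (ov_lists : List (List String)) (s : PySem.Set String) (x : String) :
    x ∈ ov_lists.foldl (fun s lst => PySem.Set.update s lst) s ↔
      x ∈ s ∨ ∃ lst ∈ ov_lists, x ∈ lst := by
  induction ov_lists generalizing s with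
  | nil => simp
  | cons a t ih =>
    simp only [List.foldl_cons, ih, PySem.Set.mem_update, List.mem_cons]
    constructor
    · rintro (⟨h | h⟩ | ⟨l, hl, hx⟩)
      · exact Or.inl h
      · exact Or.inr ⟨a, Or.inl rfl, h⟩
      · exact Or.inr ⟨l, Or.inr hl, hx⟩
    · rintro (h | ⟨l, (rfl | hl), hx⟩)
      · exact Or.inl (Or.inl h)
      · exact Or.inl (Or.inr hx)
      · exact Or.inr ⟨l, hl, hx⟩

-- A's index dict: keys that are never inserted keep their binding.
theorem get?_foldl_insert_of_not_mem (t : List String) (s0 : Int) (d : PySem.Dict String Int)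
    (x : String) (hx : x ∉ t) :
    ((PySem.List.enumerate t s0).foldl (fun d p => d.insert p.2 p.1) d).get? x = d.get? x := by
  induction t generalizing s0 d with
  | nil => simp [PySem.List.enumerate_nil]
  | cons a tl ih =>
    rw [PySem.List.enumerate_cons, List.foldl_cons]
    rw [ih _ _ (fun h => hx (List.mem_cons_of_mem _ h))]
    exact PySem.Dict.get?_insert_of_ne d s0 (fun h => hx (h ▸ List.mem_cons_self))

-- A's index dict maps each element of a duplicate-free list to its position.
theorem get?_foldl_insert_enumerate (l : List String) (s0 : Int) (d : PySem.Dict String Int)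
    (x : String) (hnd : l.Nodup) (hx : x ∈ l) :
    ((PySem.List.enumerate l s0).foldl (fun d p => d.insert p.2 p.1) d).get? x
      = some (s0 + (l.idxOf x : Int)) := by
  induction l generalizing s0 d with
  | nil => cases hx
  | cons a tl ih =>
    rw [PySem.List.enumerate_cons, List.foldl_cons]
    rcases List.mem_cons.1 hx with rfl | hxt
    · rw [get?_foldl_insert_of_not_mem _ _ _ _ (List.nodup_cons.1 hnd).1]
      simp [PySem.Dict.get?_insert_self]
    · have hne : x ≠ a := fun h => (List.nodup_cons.1 hnd).1 (h ▸ hxt)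
      rw [ih _ _ (List.Nodup.of_cons hnd) hxt, List.idxOf_cons_ne _ (Ne.symm hne)]
      congr 1
      push_cast
      ring

-- In a strictly increasing list every element is at most the last one.
theorem le_getLast_of_pairwise_lt (zs : List String) (hp : zs.Pairwise (· < ·))
    (x y : String) (hx : x ∈ zs) (hy : zs.getLast? = some y) : x ≤ y := by
  induction zs with
  | nil => cases hy
  | cons a t ih =>
    cases t with
    | nil =>
      simp at hy hx
      subst hy; subst hx; exact le_refl _
    | cons b t' =>
      rw [List.getLast?_cons_cons] at hy
      rcases List.mem_cons.1 hx with rfl | hxt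
      · exact le_of_lt ((List.pairwise_cons.1 hp).1 y (List.mem_of_getLast? hy))
      · exact ih (List.pairwise_cons.1 hp).2 hxt hy

-- In a strictly increasing list the last element's index is length - 1.
theorem idxOf_getLast_of_pairwise_lt (zs : List String) (hp : zs.Pairwise (· < ·))
    (s : String) (hs : zs.getLast? = some s) : zs.idxOf s = zs.length - 1 := by
  induction zs with
  | nil => cases hs
  | cons a t ih =>
    cases t with
    | nil =>
      simp at hs
      subst hs; simp
    | cons b t' =>
      rw [List.getLast?_cons_cons] at hs
      have hmem := List.mem_of_getLast? hs
      have hlt := (List.pairwise_cons.1 hp).1 s hmem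
      have hne : a ≠ s := ne_of_lt hlt
      rw [List.idxOf_cons_ne _ hne, ih (List.pairwise_cons.1 hp).2 hs]
      have hpos : 0 < (b :: t').length := by simp
      simp only [List.length_cons]
      omega

-- One Python index, two same-length lists: both xs[idx] and ys[idx] read the same Nat position.
theorem pyGetD_same_pos {A B : Type} (xs : List A) (ys : List B) (idx : Int) (dx : A) (dy : B)
    (hlen : ys.length = xs.length) (h : PySem.Raise.InRange xs.length idx) :
    ∃ j : Nat, j < xs.length ∧ PySem.List.pyGetD xs idx dx = xs.getD j dx ∧
      PySem.List.pyGetD ys idx dy = ys.getD j dy := by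
  obtain ⟨h1, h2⟩ := h
  by_cases hpos : 0 ≤ idx
  · refine ⟨idx.toNat, by omega, ?_, ?_⟩
    · rw [PySem.List.pyGetD_eq_getElem xs dx hpos h2, List.getD_eq_getElem xs dx (by omega)]
    · rw [PySem.List.pyGetD_eq_getElem ys dy hpos (by omega), List.getD_eq_getElem ys dy (by omega)]
  · have hneg : idx < 0 := by omega
    set k : Nat := (-idx).toNat with hk
    have hidx : idx = -(k : Int) := by omega
    have hk1 : 0 < k := by omega
    have hk2 : k ≤ xs.length := by omega
    refine ⟨xs.length - k, by omega, ?_, ?_⟩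
    · rw [hidx, PySem.List.pyGetD_neg_natCast xs k dx hk1 hk2, List.getD_eq_getElem xs dx (by omega)]
    · rw [hidx, PySem.List.pyGetD_neg_natCast ys k dy hk1 (by omega), List.getD_eq_getElem ys dy (by omega)]
      congr 1
      omega

-- B's scan invariant: over a string-sorted occurrence list with distinct (i, p) tags naming
-- real positions of ov, the scan extends the merged list to a strictly sorted list of exactly
-- the processed strings, keeps the remap tables' shape, and records in remaps[i][p] the final
-- index of that occurrence's string.
theorem bScan_spec (ov : List (List String)) (l : List (String × Int × Int))
    (ml : List String) (rs : List (List Int))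
    (hml : ml.Pairwise (· < ·))
    (hub : ∀ t ∈ l, ∀ x ∈ ml, x ≤ t.1)
    (hsorted : l.Pairwise (fun a b => a.1 ≤ b.1))
    (hdist : l.Pairwise (fun a b => a.2 ≠ b.2))
    (hent : ∀ t ∈ l, ∃ i p : Nat, t.2 = ((i : Int), (p : Int)) ∧ i < ov.length ∧
              p < (ov.getD i []).length ∧ t.1 = (ov.getD i []).getD p "")
    (hlen : rs.length = ov.length)
    (hshape : ∀ j, (rs.getD j []).length = (ov.getD j []).length) :
    (l.foldl bScanStep (ml, rs)).1.Pairwise (· < ·) ∧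
    (∃ d, (l.foldl bScanStep (ml, rs)).1 = ml ++ d) ∧
    (∀ x, x ∈ (l.foldl bScanStep (ml, rs)).1 ↔ x ∈ ml ∨ ∃ t ∈ l, x = t.1) ∧
    (l.foldl bScanStep (ml, rs)).2.length = rs.length ∧
    (∀ j, ((l.foldl bScanStep (ml, rs)).2.getD j []).length = (rs.getD j []).length) ∧
    (∀ i p : Nat, (∀ t ∈ l, t.2 ≠ ((i : Int), (p : Int))) →
      ((l.foldl bScanStep (ml, rs)).2.getD i []).getD p 0 = (rs.getD i []).getD p 0) ∧
    (∀ t ∈ l, ∀ i p : Nat, t.2 = ((i : Int), (p : Int)) →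
      ((l.foldl bScanStep (ml, rs)).2.getD i []).getD p 0
        = (((l.foldl bScanStep (ml, rs)).1).idxOf t.1 : Int)) := by
  induction l generalizing ml rs with
  | nil =>
    exact ⟨hml, ⟨[], by simp⟩, by simp, rfl, fun j => rfl, fun i p _ => rfl, fun t ht => by simp at ht⟩
  | cons t rest ih =>
    obtain ⟨s, ti, tp⟩ := t
    obtain ⟨i, p, ht2, hi, hp, ht1⟩ := hent _ List.mem_cons_self
    simp only [Prod.mk.injEq] at ht2
    obtain ⟨rfl, rfl⟩ := ht2
    -- the step
    set ml1 := if ml = [] ∨ ml.getLast? ≠ some s then ml ++ [s] else ml with hml1def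
    set v : Int := (ml1.length : Int) - 1 with hv
    set row := rs.getD i [] with hrow
    set rs1 := rs.set i (row.set p v) with hrs1
    have hstep : bScanStep (ml, rs) (s, ((i : Nat) : Int), ((p : Nat) : Int)) = (ml1, rs1) := by
      simp only [bScanStep, PySem.List.pySetD_natCast, PySem.List.pyGetD_natCast,
        hml1def, hrs1, hrow, hv]
    -- facts about ml1
    have hsle : ∀ x ∈ ml, x ≤ s := fun x hx => hub _ List.mem_cons_self x hx
    have hml1lt : ml1.Pairwise (· < ·) := by
      rw [hml1def]; split_ifs with hc
      · refine List.pairwise_append.2 ⟨hml, List.pairwise_singleton _ _, ?_⟩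
        intro x hx y hy
        simp only [List.mem_singleton] at hy
        rw [hy]
        rcases hc with hnil | hlastne
        · subst hnil; simp at hx
        · have hne : ml ≠ [] := List.ne_nil_of_mem hx
          obtain ⟨y0, hy0⟩ := Option.isSome_iff_exists.mp (List.getLast?_isSome.mpr hne)
          have hxy0 := le_getLast_of_pairwise_lt ml hml x y0 hx hy0
          have hy0s : y0 ≤ s := hsle y0 (List.mem_of_getLast? hy0)
          have hy0ne : y0 ≠ s := fun h => hlastne (by rw [hy0, h])
          exact lt_of_le_of_lt hxy0 (lt_of_le_of_ne hy0s hy0ne)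
      · exact hml
    have hlast1 : ml1.getLast? = some s := by
      rw [hml1def]; split_ifs with hc
      · exact List.getLast?_concat
      · by_contra h
        exact hc (Or.inr h)
    have hmem1 : ∀ x, x ∈ ml1 ↔ x ∈ ml ∨ x = s := by
      intro x
      rw [hml1def]; split_ifs with hc
      · simp
      · have hlast : ml.getLast? = some s := by
          by_contra h
          exact hc (Or.inr h)
        constructor
        · exact fun h => Or.inl h
        · rintro (h | rfl)
          · exact h
          · exact List.mem_of_getLast? hlast
    have hml1pre : ∃ d0, ml1 = ml ++ d0 := by
      rw [hml1def]; split_ifs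
      · exact ⟨[s], rfl⟩
      · exact ⟨[], by simp⟩
    have hsml1 : s ∈ ml1 := List.mem_of_getLast? hlast1
    have hml1pos : 0 < ml1.length := List.length_pos_of_mem hsml1
    -- facts about rs1
    have hi' : i < rs.length := by omega
    have hrowlen : p < row.length := by rw [hrow, hshape i]; exact hp
    have hrs1len : rs1.length = rs.length := by rw [hrs1]; simp
    have hrs1get : ∀ j : Nat, rs1.getD j [] = if j = i then row.set p v else rs.getD j [] := by
      intro j
      rw [hrs1, List.getD_eq_getElem?_getD, List.getD_eq_getElem?_getD]
      by_cases hj : j = i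
      · subst hj
        rw [List.getElem?_set_self hi']
        simp
      · rw [List.getElem?_set_ne (fun h => hj h.symm), if_neg hj]
    have hrs1shape : ∀ j, (rs1.getD j []).length = (rs.getD j []).length := by
      intro j
      rw [hrs1get j]
      split_ifs with hj
      · subst hj; simp [hrow]
      · rfl
    have hrs1at : (rs1.getD i []).getD p 0 = v := by
      rw [hrs1get i, if_pos rfl, List.getD_eq_getElem?_getD,
        List.getElem?_set_self (by simpa using hrowlen)]
      simp
    have hrs1other : ∀ i' p' : Nat, (i, p) ≠ (i', p') →
        (rs1.getD i' []).getD p' 0 = (rs.getD i' []).getD p' 0 := by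
      intro i' p' hne
      rw [hrs1get i']
      split_ifs with hj
      · subst hj
        have hpp : p ≠ p' := fun h => hne (by rw [h])
        rw [List.getD_eq_getElem?_getD, List.getElem?_set_ne hpp, ← List.getD_eq_getElem?_getD, hrow]
      · rfl
    -- hypotheses for the tail
    have hub1 : ∀ t' ∈ rest, ∀ x ∈ ml1, x ≤ t'.1 := by
      intro t' ht' x hx
      rcases (hmem1 x).1 hx with hxm | rfl
      · exact hub t' (List.mem_cons_of_mem _ ht') x hxm
      · exact (List.pairwise_cons.1 hsorted).1 t' ht'
    have hC := ih ml1 rs1 hml1lt hub1 (List.pairwise_cons.1 hsorted).2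
      (List.pairwise_cons.1 hdist).2 (fun t' ht' => hent t' (List.mem_cons_of_mem _ ht'))
      (hrs1len.trans hlen) (fun j => (hrs1shape j).trans (hshape j))
    obtain ⟨C1, ⟨d, hC2⟩, C3, C4, C5, C6, C7⟩ := hC
    rw [List.foldl_cons, hstep]
    obtain ⟨d0, hd0⟩ := hml1pre
    refine ⟨C1, ⟨d0 ++ d, by rw [hC2, hd0, List.append_assoc]⟩, ?_, C4.trans hrs1len,
      fun j => (C5 j).trans (hrs1shape j), ?_, ?_⟩
    · intro x
      rw [C3 x]
      constructor
      · rintro (hx | ⟨t', ht', rfl⟩)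
        · rcases (hmem1 x).1 hx with hxm | rfl
          · exact Or.inl hxm
          · exact Or.inr ⟨_, List.mem_cons_self, rfl⟩
        · exact Or.inr ⟨t', List.mem_cons_of_mem _ ht', rfl⟩
      · rintro (hx | ⟨t', ht', rfl⟩)
        · exact Or.inl ((hmem1 x).2 (Or.inl hx))
        · rcases List.mem_cons.1 ht' with rfl | ht'
          · exact Or.inl ((hmem1 s).2 (Or.inr rfl))
          · exact Or.inr ⟨t', ht', rfl⟩
    · intro i' p' hnone
      rw [C6 i' p' (fun u hu => hnone u (List.mem_cons_of_mem _ hu))]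
      refine hrs1other i' p' ?_
      intro h
      have h1 : i = i' := congrArg Prod.fst h
      have h2 : p = p' := congrArg Prod.snd h
      exact hnone _ List.mem_cons_self (by rw [← h1, ← h2])
    · intro t' ht' i' p' ht'2
      rcases List.mem_cons.1 ht' with rfl | ht'
      · simp only [Prod.mk.injEq, Nat.cast_inj] at ht'2
        obtain ⟨rfl, rfl⟩ := ht'2
        have hun : ∀ u ∈ rest, u.2 ≠ ((i : Int), (p : Int)) :=
          fun u hu => Ne.symm ((List.pairwise_cons.1 hdist).1 u hu)
        rw [C6 i p hun, hrs1at, hv]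
        rw [hC2, List.idxOf_append_of_mem hsml1,
          idxOf_getLast_of_pairwise_lt ml1 hml1lt s hlast1]
        omega
      · exact C7 t' ht' i' p' ht'2

-- ===== VERDICT (by name: the statement is the Claim_ definition above) =====
theorem merge_and_update_labels_spec : Claim_equal_merge_and_update_labels := by
  intro ov lbl _hdom hidx
  unfold Spec_merge_and_update_labels merge_and_update_labels merge_and_update_labels_alt
  simp only []
  set ms : PySem.Set String := ov.foldl (fun s lst => PySem.Set.update s lst) PySem.Set.empty with hms
  set mlA : List String := PySem.List.sorted ms (fun x => x) with hmlA
  set occ0 : List (String × Int × Int) :=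
    (PySem.List.enumerate ov).flatMap (fun q =>
      (PySem.List.enumerate q.2).map (fun r => (r.2, q.1, r.1))) with hocc0
  set occ : List (String × Int × Int) := PySem.List.sorted occ0 (fun t => t.1) with hocc
  set rm0 : List (List Int) := ov.map (fun lst => List.replicate lst.length 0) with hrm0
  set stB := occ.foldl bScanStep ([], rm0) with hstB
  -- membership in the occurrence list
  have hmem_occ0 : ∀ t : String × Int × Int, t ∈ occ0 ↔
      ∃ (k j : Nat) (hk : k < ov.length) (hj : j < (ov[k]'hk).length),
        t = ((ov[k]'hk)[j]'hj, (k : Int), (j : Int)) := by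
    intro t
    rw [hocc0, List.mem_flatMap]
    constructor
    · rintro ⟨q, hq, ht⟩
      rcases (PySem.List.mem_enumerate_iff ov 0 q).1 hq with ⟨k, hk, rfl⟩
      rcases List.mem_map.1 ht with ⟨r, hr, rfl⟩
      rcases (PySem.List.mem_enumerate_iff _ 0 r).1 hr with ⟨j, hj, rfl⟩
      exact ⟨k, j, hk, hj, by simp⟩
    · rintro ⟨k, j, hk, hj, rfl⟩
      refine ⟨((0 : Int) + (k : Nat), ov[k]), (PySem.List.mem_enumerate_iff ov 0 _).2 ⟨k, hk, rfl⟩, ?_⟩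
      refine List.mem_map.2 ⟨((0 : Int) + (j : Nat), ov[k][j]), (PySem.List.mem_enumerate_iff _ 0 _).2 ⟨j, hj, rfl⟩, ?_⟩
      simp
  -- the (i, p) tags are pairwise distinct
  have hdist0 : occ0.Pairwise (fun a b => a.2 ≠ b.2) := by
    rw [hocc0]
    refine List.pairwise_flatMap.2 ⟨?_, ?_⟩
    · intro q _
      refine List.pairwise_map.2 ?_
      refine (PySem.List.pairwise_lt_enumerate q.2 0).imp ?_
      intro a b hab
      simp only [ne_eq, Prod.mk.injEq, not_and]
      intro _ h2
      omega
    · refine (PySem.List.pairwise_lt_enumerate ov 0).imp ?_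
      intro q q' hqq x hx y hy
      rcases List.mem_map.1 hx with ⟨r, _, rfl⟩
      rcases List.mem_map.1 hy with ⟨r', _, rfl⟩
      simp only [ne_eq, Prod.mk.injEq, not_and]
      intro h1
      omega
  have hsortocc : occ.Pairwise (fun a b => a.1 ≤ b.1) := PySem.List.sorted_pairwise occ0 (fun t => t.1)
  have hpermocc : occ.Perm occ0 := PySem.List.sorted_perm occ0 (fun t => t.1) false
  have hdistocc : occ.Pairwise (fun a b => a.2 ≠ b.2) :=
    (List.Perm.pairwise_iff (fun {_ _} h => Ne.symm h) hpermocc).2 hdist0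
  have hentocc : ∀ t ∈ occ, ∃ i p : Nat, t.2 = ((i : Int), (p : Int)) ∧ i < ov.length ∧
      p < (ov.getD i []).length ∧ t.1 = (ov.getD i []).getD p "" := by
    intro t ht
    rcases (hmem_occ0 t).1 ((PySem.List.mem_sorted occ0 (fun t => t.1) false t).1 ht) with
      ⟨k, j, hk, hj, rfl⟩
    exact ⟨k, j, rfl, hk, by rw [List.getD_eq_getElem ov [] hk]; exact hj,
      by rw [List.getD_eq_getElem ov [] hk, List.getD_eq_getElem _ _ hj]⟩
  have hshape0 : ∀ j, (rm0.getD j []).length = (ov.getD j []).length := by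
    intro j
    rw [hrm0, List.getD_eq_getElem?_getD, List.getD_eq_getElem?_getD, List.getElem?_map]
    cases ov[j]? <;> simp
  obtain ⟨C1, ⟨d, hC2⟩, C3, C4, C5, C6, C7⟩ :=
    bScan_spec ov occ [] rm0 List.Pairwise.nil (by intro t _ x hx; simp at hx) hsortocc hdistocc
      hentocc (by rw [hrm0]; simp) hshape0
  rw [← hstB] at C1 hC2 C3 C4 C5 C6 C7
  -- the two merged lists coincide
  have hndA : ms.Nodup := nodup_foldl_update ov PySem.Set.empty List.nodup_nil
  have hndB : stB.1.Nodup := C1.imp (fun h => ne_of_lt h)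
  have hmemiff : ∀ x, x ∈ stB.1 ↔ x ∈ ms := by
    intro x
    rw [C3 x, hms, mem_foldl_update]
    simp only [List.not_mem_nil, false_or]
    constructor
    · rintro ⟨t, ht, rfl⟩
      rcases (hmem_occ0 t).1 ((PySem.List.mem_sorted occ0 (fun t => t.1) false t).1 ht) with
        ⟨k, j, hk, hj, rfl⟩
      exact Or.inr ⟨ov[k], List.getElem_mem hk, List.getElem_mem hj⟩
    · rintro (h0 | ⟨lst, hlst, hx⟩)
      · simp [PySem.Set.empty] at h0
      · rcases List.mem_iff_getElem.1 hlst with ⟨k, hk, rfl⟩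
        rcases List.mem_iff_getElem.1 hx with ⟨j, hj, rfl⟩
        exact ⟨_, (PySem.List.mem_sorted occ0 (fun t => t.1) false _).2
          ((hmem_occ0 _).2 ⟨k, j, hk, hj, rfl⟩), rfl⟩
  have hpermB : stB.1.Perm ms := (List.perm_ext_iff_of_nodup hndB hndA).2 hmemiff
  have hfst : mlA = stB.1 := by
    rw [hmlA]
    exact PySem.List.sorted_id_eq_of_perm_of_pairwise ms stB.1 hpermB (C1.imp (fun h => le_of_lt h))
  have hndmlA : mlA.Nodup := by rw [hfst]; exact hndB
  refine Prod.ext hfst ?_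
  -- the label lists coincide
  simp only []
  rw [PySem.List.foldl_append_singleton_eq_map]
  simp only [List.nil_append]
  apply List.map_congr_left
  intro q hq
  rcases (PySem.List.mem_enumerate_iff lbl 0 q).1 hq with ⟨k, hk, rfl⟩
  apply List.map_congr_left
  intro idx hidxmem
  simp only []
  obtain ⟨hklt, hinr'⟩ := hidx _ hq (List.ne_nil_of_mem hidxmem)
  have hkov : k < ov.length := by exact_mod_cast (by simpa using hklt : ((k : Int) < ov.length))
  have hov : PySem.List.pyGetD ov (0 + (k : Int)) [] = ov[k] := by
    rw [zero_add, PySem.List.pyGetD_natCast, List.getD_eq_getElem _ _ hkov]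
  have hinr : PySem.Raise.InRange (ov[k].length) idx := by
    have := hinr' idx hidxmem
    rwa [hov] at this
  -- the remap row read by B
  have hrowlen : (stB.2.getD k []).length = ov[k].length := by
    rw [C5 k, hshape0 k, List.getD_eq_getElem ov [] hkov]
  have hrowB : PySem.List.pyGetD stB.2 (0 + (k : Int)) [] = stB.2.getD k [] := by
    rw [zero_add, PySem.List.pyGetD_natCast]
  obtain ⟨j, hj, hxs, hys⟩ := pyGetD_same_pos (ov[k]) (stB.2.getD k []) idx "" 0 hrowlen hinr
  have hs_eq : PySem.List.pyGetD (ov[k]) idx "" = ov[k][j] := by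
    rw [hxs, List.getD_eq_getElem _ _ hj]
  have htmem : (ov[k][j], (k : Int), (j : Int)) ∈ occ :=
    (PySem.List.mem_sorted occ0 (fun t => t.1) false _).2 ((hmem_occ0 _).2 ⟨k, j, hkov, hj, rfl⟩)
  have hBval : PySem.List.pyGetD (PySem.List.pyGetD stB.2 (0 + (k : Int)) []) idx 0
      = (stB.1.idxOf (ov[k][j]) : Int) := by
    rw [hrowB, hys, List.getD_eq_getElem?_getD, ← List.getD_eq_getElem?_getD]
    exact C7 _ htmem k j rfl
  have hsmemA : ov[k][j] ∈ mlA := by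
    rw [hmlA, PySem.List.mem_sorted, hms, mem_foldl_update]
    exact Or.inr ⟨ov[k], List.getElem_mem hkov, List.getElem_mem hj⟩
  have hAval : ((PySem.List.enumerate mlA).foldl (fun d p => d.insert p.2 p.1)
      PySem.Dict.empty).getD (PySem.List.pyGetD (PySem.List.pyGetD ov (0 + (k : Int)) []) idx "") 0
      = (mlA.idxOf (ov[k][j]) : Int) := by
    rw [hov, hs_eq, PySem.Dict.getD_eq_get?_getD,
      get?_foldl_insert_enumerate mlA 0 PySem.Dict.empty _ hndmlA hsmemA]
    simp
  rw [hAval, hBval, hfst]
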